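-- pv_equiv track=rewrite | github.com/zacheen/python | python_learn/Algorithm_template/special/Z-algorithm.py | LCP_2D
-- ===== SOURCE A (Python) =====
-- def LCP_2D(arr) :
--     len_num = len(arr)
--     z = [[0]*len_num for _ in range(len_num)]
--     for n1, this_z in enumerate(z):
--         z_box_l = z_box_r = n1
--         for n2 in range(n1+1, len_num):
--             same_len = 0
--             if n2 <= z_box_r :
--                 same_len = min(z_box_r-n2+1, this_z[n2-z_box_l])
--             while n2 + same_len < len_num and arr[n1+same_len] == arr[n2+same_len]:
--                 # 這裡順序不能錯
--                 z_box_l = n2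
--                 z_box_r = n2 + same_len
--                 same_len += 1
--             this_z[n2] = same_len
--     return z
-- ===== SOURCE B (Python) =====
-- def LCP_2D(arr):
--     n = len(arr)
--     rows = []
--     prev = []  # row i+1 (unused when i == n-1)
--     for i in range(n - 1, -1, -1):
--         row = [((prev[j + 1] if j + 1 < n else 0) + 1)
--                if j > i and arr[i] == arr[j] else 0
--                for j in range(n)]
--         rows.append(row)
--         prev = row
--     rows.reverse()
--     return rows
-- ===== Notes on version B (the rewrite author's own statement) =====
-- stated objective: faster
-- what changed: Replaces the per-row Z-box matching (whose while-loop rescans character runs, cubic on repetitive arrays) with the bottom-up suffix-LCP dynamic program z[i][j] = z[i+1][j+1]+1 if arr[i]==arr[j] else 0, built row by row from the bottom.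
import Mathlib
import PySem

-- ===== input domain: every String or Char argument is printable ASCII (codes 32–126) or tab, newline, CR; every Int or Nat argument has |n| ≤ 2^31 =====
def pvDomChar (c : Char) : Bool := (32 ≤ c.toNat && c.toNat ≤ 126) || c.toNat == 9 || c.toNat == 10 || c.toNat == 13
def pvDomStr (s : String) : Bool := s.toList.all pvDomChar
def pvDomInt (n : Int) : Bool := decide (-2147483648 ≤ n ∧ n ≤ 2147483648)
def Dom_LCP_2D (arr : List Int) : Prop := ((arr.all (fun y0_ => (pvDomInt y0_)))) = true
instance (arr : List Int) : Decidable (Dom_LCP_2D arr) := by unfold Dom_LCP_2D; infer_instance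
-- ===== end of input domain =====

-- B replaces A's per-row Z-box scanning with the bottom-up suffix-LCP dynamic program
-- z[i][j] = z[i+1][j+1]+1 if arr[i]==arr[j] else 0 (objective: faster on repetitive input).


-- ===== PORT A =====
-- the inner `while` of A, fuel-guarded (fuel only makes it total; it is never exhausted):
-- state (z_box_l, z_box_r, same_len)
def whileA (arr : List Int) (len n1 n2 : Nat) : Nat → Nat × Nat × Nat → Nat × Nat × Nat
  | 0, st => st
  | fuel+1, (l, r, s) =>
    if n2 + s < len ∧ arr.getD (n1+s) 0 = arr.getD (n2+s) 0 then
      whileA arr len n1 n2 fuel (n2, n2+s, s+1)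
    else (l, r, s)

-- one iteration of A's inner `for n2` loop; state (this_z, z_box_l, z_box_r)
def innerA (arr : List Int) (len n1 : Nat) (st : List Int × Nat × Nat) (n2 : Nat) :
    List Int × Nat × Nat :=
  let (row, l, r) := st
  let s0 : Nat := if n2 ≤ r then min (r - n2 + 1) ((row.getD (n2 - l) 0).toNat) else 0
  let (l', r', s') := whileA arr len n1 n2 (len + 1) (l, r, s0)
  (row.set n2 (Int.ofNat s'), l', r')

-- A's row n1 (rows of z are independent: each starts as [0]*len and is mutated in place)
def rowA (arr : List Int) (len n1 : Nat) : List Int :=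
  ((List.range' (n1+1) (len - (n1+1))).foldl (innerA arr len n1)
    (List.replicate len (0 : Int), n1, n1)).1

def LCP_2D (arr : List Int) : List (List Int) :=
  let len := arr.length
  (List.range len).map (fun n1 => rowA arr len n1)

-- ===== PORT B =====
-- row i of B, from `prev` = row i+1 (the comprehension in Source B)
def rowB (arr : List Int) (n i : Nat) (prev : List Int) : List Int :=
  (List.range n).map (fun j =>
    if i < j ∧ arr.getD i 0 = arr.getD j 0 then
      (if j + 1 < n then prev.getD (j+1) 0 else 0) + 1
    else 0)

-- Source B's loop `for i in range(n-1,-1,-1)` with append+final reverse, done as cons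
def loopB (arr : List Int) (n : Nat) : Nat → List (List Int) → List Int → List (List Int)
  | 0, rows, _ => rows
  | k+1, rows, prev =>
    let row := rowB arr n k prev
    loopB arr n k (row :: rows) row

def LCP_2D_alt (arr : List Int) : List (List Int) :=
  let n := arr.length
  loopB arr n n [] []

-- ===== PRECONDITION & SPEC =====
def Spec_LCP_2D (arr : List Int) (out : List (List Int)) : Prop := out = LCP_2D_alt arr
instance (arr : List Int) (out : List (List Int)) : Decidable (Spec_LCP_2D arr out) := by unfold Spec_LCP_2D; infer_instance

-- ===== CLAIM (what is proved, stated in full; the proofs are below) =====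
def Claim_equal_LCP_2D : Prop := ∀ (arr : List Int), Dom_LCP_2D arr → Spec_LCP_2D arr (LCP_2D arr)

-- ===== LEMMAS AND PROOFS =====

-- length of the longest common prefix of two lists
def lcpList : List Int → List Int → Nat
  | a :: as, b :: bs => if a = b then lcpList as bs + 1 else 0
  | _, _ => 0

-- lcp of the suffixes of arr starting at i and j
def lcp (arr : List Int) (i j : Nat) : Nat := lcpList (arr.drop i) (arr.drop j)

-- the intended row i of the result
def bRow (arr : List Int) (n i : Nat) : List Int :=
  (List.range n).map (fun j => if i < j then (Int.ofNat (lcp arr i j)) else 0)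

theorem lcpList_nil_right (xs : List Int) : lcpList xs [] = 0 := by
  cases xs <;> simp [lcpList]

theorem lcpList_le (xs ys : List Int) : lcpList xs ys ≤ ys.length := by
  induction xs generalizing ys with
  | nil => simp [lcpList]
  | cons a as ih =>
    cases ys with
    | nil => simp [lcpList]
    | cons b bs =>
      simp only [lcpList]
      split
      · simpa using Nat.succ_le_succ (ih bs)
      · simp

theorem lcp_zero_right (arr : List Int) (i j : Nat) (h : arr.length ≤ j) :
    lcp arr i j = 0 := by
  unfold lcp
  rw [List.drop_eq_nil_of_le h, lcpList_nil_right]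

theorem lcp_bound (arr : List Int) (i j : Nat) (h : j ≤ arr.length) :
    j + lcp arr i j ≤ arr.length := by
  have := lcpList_le (arr.drop i) (arr.drop j)
  simp only [List.length_drop] at this
  unfold lcp
  omega

theorem lcp_succ (arr : List Int) (i j : Nat) (hi : i < arr.length) (hj : j < arr.length) :
    lcp arr i j =
      if arr.getD i 0 = arr.getD j 0 then lcp arr (i+1) (j+1) + 1 else 0 := by
  unfold lcp
  rw [List.drop_eq_getElem_cons hi, List.drop_eq_getElem_cons hj]
  rw [List.getD_eq_getElem _ _ hi, List.getD_eq_getElem _ _ hj]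
  simp [lcpList]

theorem lcp_pos_lt (arr : List Int) (i j : Nat) (h : 0 < lcp arr i j) :
    i < arr.length ∧ j < arr.length := by
  constructor
  · by_contra hc
    have : arr.drop i = [] := List.drop_eq_nil_of_le (by omega)
    unfold lcp at h
    rw [this] at h
    simp [lcpList] at h
  · by_contra hc
    rw [lcp_zero_right arr i j (by omega)] at h
    omega

theorem lcp_match (arr : List Int) : ∀ (k i j : Nat), k < lcp arr i j →
    arr.getD (i+k) 0 = arr.getD (j+k) 0 := by
  intro k
  induction k with
  | zero =>
    intro i j hk
    obtain ⟨hi, hj⟩ := lcp_pos_lt arr i j hk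
    rw [lcp_succ arr i j hi hj] at hk
    by_cases h : arr.getD i 0 = arr.getD j 0
    · simpa using h
    · rw [if_neg h] at hk; omega
  | succ k ih =>
    intro i j hk
    obtain ⟨hi, hj⟩ := lcp_pos_lt arr i j (by omega)
    rw [lcp_succ arr i j hi hj] at hk
    by_cases h : arr.getD i 0 = arr.getD j 0
    · simp only [h, if_true] at hk
      have := ih (i+1) (j+1) (by omega)
      simpa [Nat.add_comm, Nat.add_assoc, Nat.add_left_comm] using this
    · rw [if_neg h] at hk; omega

theorem lcp_stop (arr : List Int) : ∀ (n i j : Nat), lcp arr i j = n →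
    i + n < arr.length → j + n < arr.length →
    arr.getD (i+n) 0 ≠ arr.getD (j+n) 0 := by
  intro n
  induction n with
  | zero =>
    intro i j hL hi hj
    rw [lcp_succ arr i j (by omega) (by omega)] at hL
    by_cases h : arr.getD i 0 = arr.getD j 0
    · rw [if_pos h] at hL; omega
    · simpa using h
  | succ n ih =>
    intro i j hL hi hj
    rw [lcp_succ arr i j (by omega) (by omega)] at hL
    by_cases h : arr.getD i 0 = arr.getD j 0
    · rw [if_pos h] at hL
      have := ih (i+1) (j+1) (by omega) (by omega) (by omega)
      simpa [Nat.add_comm, Nat.add_assoc, Nat.add_left_comm] using this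
    · rw [if_neg h] at hL; omega

theorem lcp_max (arr : List Int) : ∀ (s i j : Nat),
    (∀ k < s, arr.getD (i+k) 0 = arr.getD (j+k) 0) →
    i + s ≤ arr.length → j + s ≤ arr.length → s ≤ lcp arr i j := by
  intro s
  induction s with
  | zero => intro i j _ _ _; omega
  | succ s ih =>
    intro i j hm hi hj
    have h0 : arr.getD i 0 = arr.getD j 0 := by simpa using hm 0 (by omega)
    rw [lcp_succ arr i j (by omega) (by omega), if_pos h0]
    have := ih (i+1) (j+1)
      (fun k hk => by
        have := hm (k+1) (by omega)
        simpa [Nat.add_comm, Nat.add_assoc, Nat.add_left_comm] using this)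
      (by omega) (by omega)
    omega

-- getD of a range-map row
theorem getD_range_map (n k : Nat) (f : Nat → Int) (hk : k < n) :
    ((List.range n).map f).getD k 0 = f k := by
  rw [List.getD_eq_getElem _ _ (by simpa using hk)]
  simp

-- ===== the while loop =====
theorem whileA_eq (arr : List Int) (n1 n2 : Nat) (hn : n1 < n2) :
    ∀ (fuel s l r : Nat),
    (∀ k < s, arr.getD (n1+k) 0 = arr.getD (n2+k) 0) →
    n2 + s ≤ arr.length →
    arr.length + 1 ≤ fuel + n2 + s →
    whileA arr arr.length n1 n2 fuel (l, r, s) =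
      if lcp arr n1 n2 ≤ s then (l, r, s)
      else (n2, n2 + lcp arr n1 n2 - 1, lcp arr n1 n2) := by
  intro fuel
  induction fuel with
  | zero => intro s l r _ hs hf; omega
  | succ fuel ih =>
    intro s l r hm hs hf
    have hsL : s ≤ lcp arr n1 n2 := lcp_max arr s n1 n2 hm (by omega) hs
    by_cases hLs : lcp arr n1 n2 ≤ s
    · -- s = lcp: the loop condition fails
      have hseq : s = lcp arr n1 n2 := by omega
      have hcond : ¬ (n2 + s < arr.length ∧ arr.getD (n1+s) 0 = arr.getD (n2+s) 0) := by
        rintro ⟨h1, h2⟩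
        exact lcp_stop arr s n1 n2 hseq.symm (by omega) h1 h2
      rw [whileA, if_neg hcond, if_pos hLs]
    · -- s < lcp: the loop runs once more
      have hslt : s < lcp arr n1 n2 := by omega
      have hb : n2 + lcp arr n1 n2 ≤ arr.length := lcp_bound arr n1 n2 (by omega)
      have hcond : n2 + s < arr.length ∧ arr.getD (n1+s) 0 = arr.getD (n2+s) 0 :=
        ⟨by omega, lcp_match arr s n1 n2 hslt⟩
      rw [whileA, if_pos hcond]
      have := ih (s+1) n2 (n2+s)
        (fun k hk => lcp_match arr k n1 n2 (by omega)) (by omega) (by omega)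
      rw [this]
      by_cases hL1 : lcp arr n1 n2 ≤ s + 1
      · have heq : lcp arr n1 n2 = s + 1 := by omega
        have h2 : n2 + (s + 1) - 1 = n2 + s := by omega
        rw [if_pos hL1, if_neg hLs, heq, h2]
      · rw [if_neg hL1, if_neg hLs]

-- ===== the per-row invariant of A =====
def InvA (arr : List Int) (n1 n2 : Nat) (st : List Int × Nat × Nat) : Prop :=
  st.1.length = arr.length ∧
  (∀ j < arr.length,
    st.1.getD j 0 = if n1 < j ∧ j < n2 then Int.ofNat (lcp arr n1 j) else 0) ∧
  ((st.2.1 = n1 ∧ st.2.2 = n1) ∨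
    (n1 < st.2.1 ∧ st.2.1 < n2 ∧ 1 ≤ lcp arr n1 st.2.1 ∧
     st.2.2 + 1 = st.2.1 + lcp arr n1 st.2.1)) ∧
  (1 ≤ n1 → ∀ j, st.2.1 < j → j < n2 → arr.getD n1 0 ≠ arr.getD j 0)

-- validity of the z-box shortcut value s0
theorem s0_valid (arr : List Int) (n1 n2 : Nat) (row : List Int) (l r s0 : Nat)
    (hn : n1 < n2) (hlen : n2 < arr.length)
    (hinv : InvA arr n1 n2 (row, l, r))
    (hs0 : s0 = if n2 ≤ r then min (r - n2 + 1) ((row.getD (n2 - l) 0).toNat) else 0) :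
    (∀ k < s0, arr.getD (n1+k) 0 = arr.getD (n2+k) 0) ∧ n2 + s0 ≤ arr.length ∧
      (1 ≤ n1 → s0 = 0) := by
  obtain ⟨hLen, hE, hbox, hc⟩ := hinv
  simp only [] at hE hbox hc
  by_cases hr : n2 ≤ r
  · rw [if_pos hr] at hs0
    obtain ⟨hl1, hr1⟩ | ⟨hbl, hbln2, hb1, hbr⟩ := hbox
    · omega
    · set L := lcp arr n1 l with hLdef
      have hidx_lt : n2 - l < arr.length := by omega
      have hv := hE (n2 - l) hidx_lt
      have hLbound : l + L ≤ arr.length := lcp_bound arr n1 l (by omega)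
      by_cases hni : n1 < n2 - l
      · by_cases hn1 : 1 ≤ n1
        · -- n1 ≥ 1: the looked-up entry is 0, so s0 = 0
          have hm : arr.getD (n1 + (n2 - l - n1)) 0 = arr.getD (l + (n2 - l - n1)) 0 :=
            lcp_match arr (n2 - l - n1) n1 l (by omega)
          rw [(by omega : n1 + (n2 - l - n1) = n2 - l),
              (by omega : l + (n2 - l - n1) = n2 - n1)] at hm
          have hne : arr.getD n1 0 ≠ arr.getD (n2 - l) 0 := by
            rw [hm]
            exact hc hn1 (n2 - n1) (by omega) (by omega)
          have hz : lcp arr n1 (n2 - l) = 0 := by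
            rw [lcp_succ arr n1 (n2 - l) (by omega) hidx_lt, if_neg hne]
          rw [hv, if_pos ⟨hni, by omega⟩, hz] at hs0
          simp at hs0
          exact ⟨fun k hk => absurd hk (by omega), by omega, fun _ => hs0⟩
        · -- n1 = 0: the textbook Z shortcut
          have hn0 : n1 = 0 := by omega
          subst hn0
          rw [hv, if_pos ⟨hni, by omega⟩] at hs0
          rw [(by simp : (Int.ofNat (lcp arr 0 (n2 - l))).toNat = lcp arr 0 (n2 - l))] at hs0
          refine ⟨?_, by omega, fun hcon => by omega⟩
          intro k hk
          have hk1 : k < lcp arr 0 (n2 - l) := by omega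
          have hk2 : (n2 - l) + k < L := by omega
          have m1 := lcp_match arr k 0 (n2 - l) hk1
          have m2 := lcp_match arr ((n2 - l) + k) 0 l hk2
          rw [(by omega : l + ((n2 - l) + k) = n2 + k)] at m2
          simp only [Nat.zero_add] at m1 m2 ⊢
          exact m1.trans m2
      · -- the looked-up entry is in the lower triangle: 0
        rw [hv, if_neg (fun hcon => hni hcon.1)] at hs0
        simp at hs0
        exact ⟨fun k hk => absurd hk (by omega), by omega, fun _ => hs0⟩
  · rw [if_neg hr] at hs0
    exact ⟨fun k hk => absurd hk (by omega), by omega, fun _ => hs0⟩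

theorem innerA_step (arr : List Int) (n1 n2 : Nat) (st : List Int × Nat × Nat)
    (hn : n1 < n2) (hlen : n2 < arr.length) (hinv : InvA arr n1 n2 st) :
    InvA arr n1 (n2+1) (innerA arr arr.length n1 st n2) := by
  obtain ⟨row, l, r⟩ := st
  obtain ⟨hv, hs2, hs3⟩ := s0_valid arr n1 n2 row l r _ hn hlen hinv rfl
  obtain ⟨hLen, hE, hbox, hc⟩ := hinv
  simp only [] at hLen hE hbox hc
  unfold innerA
  simp only []
  generalize hg : (if n2 ≤ r then min (r - n2 + 1) ((row.getD (n2 - l) 0).toNat) else 0) = s0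
  rw [hg] at hv hs2 hs3
  rw [whileA_eq arr n1 n2 hn (arr.length + 1) s0 l r hv hs2 (by omega)]
  have hs0Lc : s0 ≤ lcp arr n1 n2 := lcp_max arr s0 n1 n2 hv (by omega) hs2
  have hLcB : n2 + lcp arr n1 n2 ≤ arr.length := lcp_bound arr n1 n2 (by omega)
  -- entries after writing the lcp at position n2
  have hrow : ∀ j < arr.length, (row.set n2 (Int.ofNat (lcp arr n1 n2))).getD j 0 =
      if n1 < j ∧ j < n2 + 1 then Int.ofNat (lcp arr n1 j) else 0 := by
    intro j hj
    have hjr : j < (row.set n2 (Int.ofNat (lcp arr n1 n2))).length := by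
      rw [List.length_set]; omega
    rw [List.getD_eq_getElem _ 0 hjr, List.getElem_set]
    by_cases hjn : n2 = j
    · rw [if_pos hjn, if_pos (by omega), hjn]
    · rw [if_neg hjn, ← List.getD_eq_getElem _ 0 (by omega : j < row.length),
        hE j hj]
      have hiff : (n1 < j ∧ j < n2) ↔ (n1 < j ∧ j < n2 + 1) := by omega
      simp only [hiff]
  by_cases hLs : lcp arr n1 n2 ≤ s0
  · -- while loop did not run: s0 = lcp
    rw [if_pos hLs]
    have hseq : s0 = lcp arr n1 n2 := by omega
    refine ⟨by simp only [List.length_set]; omega, ?_, ?_, ?_⟩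
    · simp only []
      rw [hseq]
      exact hrow
    · simp only []
      obtain ⟨hl1, hr1⟩ | ⟨hbl, hbln2, hb1, hbr⟩ := hbox
      · exact Or.inl ⟨hl1, hr1⟩
      · exact Or.inr ⟨hbl, by omega, hb1, hbr⟩
    · intro hn1 j hlj hjn
      simp only [] at hlj
      have hs00 : s0 = 0 := hs3 hn1
      have hLc0 : lcp arr n1 n2 = 0 := by omega
      by_cases hj2 : j < n2
      · exact hc hn1 j hlj hj2
      · have hjeq : j = n2 := by omega
        subst hjeq
        have := lcp_stop arr 0 n1 j hLc0 (by omega) (by omega)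
        simpa using this
  · -- while loop ran: new box at n2
    rw [if_neg hLs]
    refine ⟨by simp only [List.length_set]; omega, ?_, ?_, ?_⟩
    · simp only []
      exact hrow
    · simp only []
      exact Or.inr ⟨hn, by omega, by omega, by omega⟩
    · intro hn1 j hlj hjn
      simp only [] at hlj
      omega

theorem foldA_inv (arr : List Int) (n1 : Nat) :
    ∀ (cnt a : Nat) (st : List Int × Nat × Nat), n1 < a → a + cnt ≤ arr.length →
    InvA arr n1 a st →
    InvA arr n1 (a + cnt) ((List.range' a cnt).foldl (innerA arr arr.length n1) st) := by
  intro cnt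
  induction cnt with
  | zero => intro a st _ _ h; simpa using h
  | succ cnt ih =>
    intro a st ha hcnt h
    rw [List.range'_succ, List.foldl_cons]
    have := ih (a+1) (innerA arr arr.length n1 st a)
      (by omega) (by omega) (innerA_step arr n1 a st ha (by omega) h)
    simpa [Nat.add_comm, Nat.add_assoc, Nat.add_left_comm] using this

theorem rowA_eq (arr : List Int) (n1 : Nat) (h : n1 < arr.length) :
    rowA arr arr.length n1 = bRow arr arr.length n1 := by
  have h0 : InvA arr n1 (n1+1) (List.replicate arr.length (0 : Int), n1, n1) := by
    refine ⟨by simp, ?_, Or.inl ⟨rfl, rfl⟩, ?_⟩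
    · intro j hj
      rw [List.getD_eq_getElem _ _ (by simpa using hj)]
      rw [List.getElem_replicate, if_neg (by omega)]
    · intro _ j hlj hjn
      simp only [] at hlj
      omega
  have hf := foldA_inv arr n1 (arr.length - (n1+1)) (n1+1)
      (List.replicate arr.length (0 : Int), n1, n1) (by omega) (by omega) h0
  rw [(by omega : n1 + 1 + (arr.length - (n1+1)) = arr.length)] at hf
  obtain ⟨hL, hE, -, -⟩ := hf
  unfold rowA
  apply List.ext_getElem
  · rw [hL]
    unfold bRow
    simp
  · intro j h1 h2
    rw [← List.getD_eq_getElem _ 0 h1, hE j (by omega)]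
    unfold bRow
    rw [List.getElem_map, List.getElem_range]
    have hjlen : j < arr.length := by
      unfold bRow at h2
      simpa using h2
    by_cases hj : n1 < j
    · rw [if_pos ⟨hj, hjlen⟩, if_pos hj]
    · rw [if_neg (fun hcon => hj hcon.1), if_neg hj]

-- ===== B's side =====
theorem rowB_eq (arr : List Int) (i : Nat) (prev : List Int) (hi : i < arr.length)
    (hprev : i + 1 = arr.length ∨ prev = bRow arr arr.length (i+1)) :
    rowB arr arr.length i prev = bRow arr arr.length i := by
  unfold rowB bRow
  apply List.map_congr_left
  intro j hj
  have hjn : j < arr.length := List.mem_range.mp hj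
  by_cases hij : i < j
  · by_cases he : arr.getD i 0 = arr.getD j 0
    · rw [if_pos ⟨hij, he⟩, if_pos hij]
      have hrec : lcp arr i j = lcp arr (i+1) (j+1) + 1 := by
        rw [lcp_succ arr i j hi hjn, if_pos he]
      by_cases hj1 : j + 1 < arr.length
      · obtain hp | hp := hprev
        · omega
        · rw [if_pos hj1, hp]
          unfold bRow
          rw [getD_range_map _ _ _ hj1, if_pos (by omega : i + 1 < j + 1), hrec]
          simp
      · rw [if_neg hj1, hrec, lcp_zero_right arr (i+1) (j+1) (by omega)]
        simp
    · rw [if_neg (fun hcon => he hcon.2), if_pos hij]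
      rw [lcp_succ arr i j hi hjn, if_neg he]
      simp
  · rw [if_neg (fun hcon => hij hcon.1), if_neg hij]

theorem loopB_eq (arr : List Int) :
    ∀ (k : Nat) (rows : List (List Int)) (prev : List Int), k ≤ arr.length →
    (k = arr.length ∨ prev = bRow arr arr.length k) →
    loopB arr arr.length k rows prev =
      (List.range k).map (bRow arr arr.length) ++ rows := by
  intro k
  induction k with
  | zero => intro rows prev _ _; simp [loopB]
  | succ k ih =>
    intro rows prev hk hprev
    rw [loopB]
    have hrow : rowB arr arr.length k prev = bRow arr arr.length k :=
      rowB_eq arr k prev (by omega) hprev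
    rw [hrow, ih (bRow arr arr.length k :: rows) (bRow arr arr.length k)
      (by omega) (Or.inr rfl)]
    rw [List.range_succ]
    simp

-- ===== VERDICT (by name: the statement is the Claim_ definition above) =====
theorem LCP_2D_spec : Claim_equal_LCP_2D := by
  intro arr _
  unfold Spec_LCP_2D LCP_2D LCP_2D_alt
  rw [loopB_eq arr arr.length [] [] (le_refl _) (Or.inl rfl)]
  simp only [List.append_nil]
  apply List.map_congr_left
  intro n1 hn1
  exact rowA_eq arr n1 (List.mem_range.mp hn1)
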